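-- pv_equiv track=rewrite | github.com/marcus-gee/CS-1 | lab2/lab2_practice.py | count_letter_matches
-- ===== SOURCE A (Python) =====
-- def count_letter_matches(code, guess):
--     counter = 0
--     guess_lst = list(guess)
--     code_lst = list(code)
--     for i in range(len(code_lst)):
--         if code_lst[i] in guess_lst:
--             counter += 1
--             guess_lst.remove(code_lst[i])
--         else:
--             counter += 0
--     return counter
-- ===== SOURCE B (Python) =====
-- def count_letter_matches(code, guess):
--     a = sorted(code)
--     b = sorted(guess)
--     i = j = n = 0
--     while i < len(a) and j < len(b):
--         if a[i] == b[j]: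
--             n += 1
--             i += 1
--             j += 1
--         elif a[i] < b[j]:
--             i += 1
--         else:
--             j += 1
--     return n
-- ===== Notes on version B (the rewrite author's own statement) =====
-- stated objective: faster
-- what changed: Replaces A's per-character membership scan and list.remove over a shrinking guess list with a sort of both strings followed by a single two-pointer merge that counts equal elements.
import Mathlib
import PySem

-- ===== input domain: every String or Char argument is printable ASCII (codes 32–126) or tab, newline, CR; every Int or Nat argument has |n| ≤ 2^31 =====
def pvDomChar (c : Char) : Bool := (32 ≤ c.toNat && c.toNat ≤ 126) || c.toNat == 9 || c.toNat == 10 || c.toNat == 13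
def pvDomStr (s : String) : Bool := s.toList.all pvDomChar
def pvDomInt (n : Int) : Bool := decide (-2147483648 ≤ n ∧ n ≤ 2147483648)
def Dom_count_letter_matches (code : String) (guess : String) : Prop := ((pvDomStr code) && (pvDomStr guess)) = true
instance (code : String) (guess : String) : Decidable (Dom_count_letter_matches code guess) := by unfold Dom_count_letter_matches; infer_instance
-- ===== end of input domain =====

-- B sorts both strings and counts matches in one two-pointer merge instead of A's
-- repeated membership scan + remove over the guess list (objective: faster).

-- ===== PORT A =====
-- for each code character, membership test in the remaining guess list; on a hit,
-- remove its first occurrence (Python list.remove = PySem.List.remove?).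
def count_letter_matches (code : String) (guess : String) : Int :=
  let guess_lst := guess.toList
  let code_lst := code.toList
  let st := code_lst.foldl
    (fun (st : Int × List Char) c =>
      if c ∈ st.2 then (st.1 + 1, (PySem.List.remove? st.2 c).getD st.2)
      else (st.1 + 0, st.2))
    (0, guess_lst)
  st.1

-- ===== PORT B =====
-- the two-pointer while loop of Source B as structural recursion on the two sorted lists
def pvMerge : List Char → List Char → Int
  | x :: xs, y :: ys =>
      if x = y then 1 + pvMerge xs ys
      else if x < y then pvMerge xs (y :: ys)
      else pvMerge (x :: xs) ys
  | _, _ => 0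
termination_by xs ys => xs.length + ys.length

def count_letter_matches_alt (code : String) (guess : String) : Int :=
  pvMerge (PySem.List.sorted code.toList (fun c => c) false)
          (PySem.List.sorted guess.toList (fun c => c) false)

-- ===== PRECONDITION & SPEC =====
def Spec_count_letter_matches (code : String) (guess : String) (out : Int) : Prop := out = count_letter_matches_alt code guess
instance (code : String) (guess : String) (out : Int) : Decidable (Spec_count_letter_matches code guess out) := by unfold Spec_count_letter_matches; infer_instance

-- ===== CLAIM (what is proved, stated in full; the proofs are below) =====
def Claim_equal_count_letter_matches : Prop := ∀ (code : String) (guess : String), Dom_count_letter_matches code guess → Spec_count_letter_matches code guess (count_letter_matches code guess)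

-- ===== LEMMAS AND PROOFS =====

-- A's loop computes the multiset-intersection size
theorem pvFoldA_eq (cs : List Char) : ∀ (gs : List Char) (n : Int),
    (cs.foldl
      (fun (st : Int × List Char) c =>
        if c ∈ st.2 then (st.1 + 1, (PySem.List.remove? st.2 c).getD st.2)
        else (st.1 + 0, st.2))
      (n, gs)).1
    = n + Multiset.card ((↑cs : Multiset Char) ∩ (↑gs : Multiset Char)) := by
  induction cs with
  | nil => intro gs n; simp
  | cons c cs ih =>
    intro gs n
    by_cases h : c ∈ gs
    · simp only [List.foldl_cons, if_pos h, PySem.List.remove?_eq_some_erase _ _ h,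
        Option.getD_some, ih]
      have : ((↑(c :: cs) : Multiset Char) ∩ (↑gs : Multiset Char))
          = c ::ₘ ((↑cs : Multiset Char) ∩ ((↑gs : Multiset Char).erase c)) := by
        rw [← Multiset.cons_coe, Multiset.cons_inter_of_pos _ (by simpa using h)]
      rw [this]
      simp [← Multiset.coe_erase]
      ring
    · simp only [List.foldl_cons, if_neg h, ih]
      have : ((↑(c :: cs) : Multiset Char) ∩ (↑gs : Multiset Char))
          = (↑cs : Multiset Char) ∩ (↑gs : Multiset Char) := by
        rw [← Multiset.cons_coe, Multiset.cons_inter_of_neg _ (by simpa using h)]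
      rw [this]
      ring

theorem count_letter_matches_eq_interCard (code guess : String) :
    count_letter_matches code guess
      = Multiset.card ((↑code.toList : Multiset Char) ∩ (↑guess.toList : Multiset Char)) := by
  unfold count_letter_matches
  rw [pvFoldA_eq]
  ring

-- the merge on two ≤-sorted lists computes the multiset-intersection size
theorem pvMerge_eq (xs ys : List Char)
    (hx : xs.Pairwise (· ≤ ·)) (hy : ys.Pairwise (· ≤ ·)) :
    pvMerge xs ys = Multiset.card ((↑xs : Multiset Char) ∩ (↑ys : Multiset Char)) := by
  induction xs, ys using pvMerge.induct with
  | case1 xs y ys ih =>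
    rw [pvMerge]
    rw [ih (List.Pairwise.sublist (List.sublist_cons_self y xs) hx)
          (List.Pairwise.sublist (List.sublist_cons_self y ys) hy)]
    have : ((↑(y :: xs) : Multiset Char) ∩ (↑(y :: ys) : Multiset Char))
        = y ::ₘ ((↑xs : Multiset Char) ∩ (↑ys : Multiset Char)) := by
      rw [← Multiset.cons_coe, ← Multiset.cons_coe,
        Multiset.cons_inter_of_pos _ (by simp), Multiset.erase_cons_head]
    rw [this]
    simp
    ring
  | case2 x xs y ys hne hlt ih =>
    rw [pvMerge]
    simp only [if_neg hne, if_pos hlt]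
    rw [ih (List.Pairwise.sublist (List.sublist_cons_self x xs) hx) hy]
    have hnot : x ∉ y :: ys := by
      intro hmem
      simp only [List.mem_cons] at hmem
      rcases hmem with rfl | hmem
      · exact hne rfl
      · have := (List.pairwise_cons.mp hy).1 x hmem
        exact absurd (lt_of_lt_of_le hlt this) (lt_irrefl x)
    have : ((↑(x :: xs) : Multiset Char) ∩ (↑(y :: ys) : Multiset Char))
        = (↑xs : Multiset Char) ∩ (↑(y :: ys) : Multiset Char) := by
      rw [← Multiset.cons_coe, Multiset.cons_inter_of_neg _ (by simpa using hnot)]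
    rw [this]
  | case3 x xs y ys hne hnlt ih =>
    rw [pvMerge]
    simp only [if_neg hne, if_neg hnlt]
    rw [ih hx (List.Pairwise.sublist (List.sublist_cons_self y ys) hy)]
    have hygt : y < x := lt_of_le_of_ne (le_of_not_gt hnlt) (fun h => hne h.symm)
    have hnot : y ∉ x :: xs := by
      intro hmem
      simp only [List.mem_cons] at hmem
      rcases hmem with rfl | hmem
      · exact hne rfl
      · have := (List.pairwise_cons.mp hx).1 y hmem
        exact absurd (lt_of_lt_of_le hygt this) (lt_irrefl y)
    have : ((↑(x :: xs) : Multiset Char) ∩ (↑(y :: ys) : Multiset Char))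
        = (↑(x :: xs) : Multiset Char) ∩ (↑ys : Multiset Char) := by
      rw [Multiset.inter_comm, ← Multiset.cons_coe (a := y),
        Multiset.cons_inter_of_neg _ (by simpa using hnot), Multiset.inter_comm]
    rw [this]
  | case4 xs ys h =>
    cases xs with
    | nil => simp [pvMerge]
    | cons a as =>
      cases ys with
      | nil => simp [pvMerge]
      | cons b bs => exact (h a as b bs rfl rfl).elim

theorem count_letter_matches_alt_eq_interCard (code guess : String) :
    count_letter_matches_alt code guess
      = Multiset.card ((↑code.toList : Multiset Char) ∩ (↑guess.toList : Multiset Char)) := by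
  unfold count_letter_matches_alt
  rw [pvMerge_eq _ _ (PySem.List.sorted_pairwise _ _) (PySem.List.sorted_pairwise _ _)]
  have h1 : ((PySem.List.sorted code.toList (fun c => c) false : List Char) : Multiset Char)
      = (↑code.toList : Multiset Char) :=
    Multiset.coe_eq_coe.mpr (PySem.List.sorted_perm _ _ _)
  have h2 : ((PySem.List.sorted guess.toList (fun c => c) false : List Char) : Multiset Char)
      = (↑guess.toList : Multiset Char) :=
    Multiset.coe_eq_coe.mpr (PySem.List.sorted_perm _ _ _)
  rw [h1, h2]

-- ===== VERDICT (by name: the statement is the Claim_ definition above) =====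
theorem count_letter_matches_spec : Claim_equal_count_letter_matches := by
  intro code guess _
  unfold Spec_count_letter_matches
  rw [count_letter_matches_eq_interCard, count_letter_matches_alt_eq_interCard]
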